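-- pv_equiv track=rewrite | github.com/Gautam-813/MT5_Report_Analyser | utils/data_cleaner.py | format_metric_name
-- ===== SOURCE A (Python) =====
-- def format_metric_name(key):
--     """
--     Format metric names for better display
--     """
--     # Replace underscores with spaces and title case
--     formatted = key.replace('_', ' ').title()
--
--     # Handle special cases
--     replacements = {
--         'Pnl': 'P&L',
--         'Pf': 'Profit Factor',
--         'Wr': 'Win Rate',
--         'Rr': 'Risk Reward',
--         'Avg': 'Average',
--         'Max': 'Maximum',
--         'Min': 'Minimum',
--         'Std': 'Standard Deviation'
--     }
--
--     for old, new in replacements.items():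
--         formatted = formatted.replace(old, new)
--
--     return formatted
-- ===== SOURCE B (Python) =====
-- def format_metric_name(key):
--     REPL = (
--         ('Pnl', 'P&L'),
--         ('Pf', 'Profit Factor'),
--         ('Wr', 'Win Rate'),
--         ('Rr', 'Risk Reward'),
--         ('Avg', 'Average'),
--         ('Max', 'Maximum'),
--         ('Min', 'Minimum'),
--         ('Std', 'Standard Deviation'),
--     )
--
--     # Fused underscore-replacement + title casing, decided locally from the
--     # previous original character ('_' and ' ' are both non-alphabetic, so the
--     # word-boundary state is the same as after A's staged replace+title).
--     def titled(c, prev):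
--         if c == '_':
--             return ' '
--         if c.isalpha():
--             return c.lower() if (prev is not None and prev.isalpha()) else c.upper()
--         return c
--
--     t = ''.join(titled(c, p) for c, p in zip(key, (None,) + tuple(key)))
--
--     # One left-to-right pass: at each position emit the replacement of the
--     # first matching key (keys never overlap and no replacement value
--     # re-creates a key, so this equals eight successive full replace passes).
--     out = []
--     i = 0
--     n = len(t)
--     while i < n:
--         for old, new in REPL:
--             if t.startswith(old, i):
--                 out.append(new)
--                 i += len(old)
--                 break
--         else:
--             out.append(t[i])
--             i += 1
--     return ''.join(out)
-- ===== Notes on version B (the rewrite author's own statement) =====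
-- stated objective: alternative
-- what changed: B fuses A's staged underscore-to-space replacement and title() into one locally-decided per-character map (case chosen from the previous original character) and replaces A's eight successive full-string str.replace passes by one left-to-right scan that at each position emits the replacement of the first matching key (valid because keys never overlap and no replacement value re-creates a key).
import Mathlib
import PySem

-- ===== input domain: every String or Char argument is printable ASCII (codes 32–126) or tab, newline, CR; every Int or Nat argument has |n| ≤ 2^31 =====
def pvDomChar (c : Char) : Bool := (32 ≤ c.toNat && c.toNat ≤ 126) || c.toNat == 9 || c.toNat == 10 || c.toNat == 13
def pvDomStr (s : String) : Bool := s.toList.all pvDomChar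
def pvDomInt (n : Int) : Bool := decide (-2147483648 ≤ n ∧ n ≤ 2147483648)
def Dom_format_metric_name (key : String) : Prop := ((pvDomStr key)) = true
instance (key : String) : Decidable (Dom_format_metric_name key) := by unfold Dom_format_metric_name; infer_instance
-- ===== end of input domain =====

-- B fuses A's staged underscore-to-space replacement + title() into one locally-decided character map and
-- replaces A's eight successive full-string replace passes by one left-to-right scan
-- emitting the first matching key's replacement at each position (objective: alternative).

-- ===== PORT A =====

-- str.title(), ported by hand char by char (exact on the ASCII domain: a letter is
-- uppercased after a non-letter and lowercased after a letter)
def pvTitle : List Char → Bool → List Char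
  | [], _ => []
  | c :: cs, prev =>
      (if c.isAlpha then (if prev then c.toLower else c.toUpper) else c) :: pvTitle cs c.isAlpha

-- A's `replacements` dict literal, as an association list in insertion order
def pvKV : List (List Char × List Char) :=
  [("Pnl".toList, "P&L".toList), ("Pf".toList, "Profit Factor".toList),
   ("Wr".toList, "Win Rate".toList), ("Rr".toList, "Risk Reward".toList),
   ("Avg".toList, "Average".toList), ("Max".toList, "Maximum".toList),
   ("Min".toList, "Minimum".toList), ("Std".toList, "Standard Deviation".toList)]

def format_metric_name (key : String) : String :=
  let formatted := pvTitle (PySem.Chars.replace key.toList ['_'] [' ']) false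
  String.ofList (pvKV.foldl (fun f p => PySem.Chars.replace f p.1 p.2) formatted)

-- ===== PORT B =====

-- Source B's REPL tuple (same pairs in the same order as A's dict)
def pvAltRepl : List (List Char × List Char) :=
  [(['P','n','l'], ['P','&','L']),
   (['P','f'], ['P','r','o','f','i','t',' ','F','a','c','t','o','r']),
   (['W','r'], ['W','i','n',' ','R','a','t','e']),
   (['R','r'], ['R','i','s','k',' ','R','e','w','a','r','d']),
   (['A','v','g'], ['A','v','e','r','a','g','e']),
   (['M','a','x'], ['M','a','x','i','m','u','m']),
   (['M','i','n'], ['M','i','n','i','m','u','m']),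
   (['S','t','d'], ['S','t','a','n','d','a','r','d',' ','D','e','v','i','a','t','i','o','n'])]

-- Source B's `titled(c, prev)`
def pvTitledChar (c : Char) (prev : Option Char) : Char :=
  if c = '_' then ' '
  else if c.isAlpha then
    (if (match prev with | some p => p.isAlpha | none => false) then c.toLower else c.toUpper)
  else c

-- Source B's `''.join(titled(c, p) for c, p in zip(key, (None,) + tuple(key)))`
def pvAltTitle (cs : List Char) : List Char :=
  (cs.zip (none :: cs.map some)).map (fun cp => pvTitledChar cp.1 cp.2)

-- the inner `for … break/else` of Source B: first (old, new) pair whose pattern matches here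
def pvAltFirst : List (List Char × List Char) → List Char → Option (List Char × List Char)
  | [], _ => none
  | p :: rest, cs => if p.1.isPrefixOf cs then some p else pvAltFirst rest cs

lemma pvAltFirst_some_mem_prefix :
    ∀ (kv : List (List Char × List Char)) (cs : List Char) (p : List Char × List Char),
      pvAltFirst kv cs = some p → p ∈ kv ∧ p.1.isPrefixOf cs = true := by
  intro kv
  induction kv with
  | nil => intro cs p h; simp [pvAltFirst] at h
  | cons q rest ih =>
      intro cs p h
      simp only [pvAltFirst] at h
      by_cases hq : q.1.isPrefixOf cs = true
      · simp [hq] at h; subst h; exact ⟨List.mem_cons_self, hq⟩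
      · simp [hq] at h
        rcases ih cs p h with ⟨hm, hp⟩
        exact ⟨List.mem_cons_of_mem _ hm, hp⟩

-- Source B's while loop over the titled string, one position (or one matched key) at a time
def pvAltPass (cs : List Char) : List Char :=
  match _h : pvAltFirst pvAltRepl cs with
  | some p => p.2 ++ pvAltPass (cs.drop p.1.length)
  | none =>
      match cs with
      | [] => []
      | c :: t => c :: pvAltPass t
termination_by cs.length
decreasing_by
  · rcases pvAltFirst_some_mem_prefix _ _ _ _h with ⟨hm, hp⟩
    have hpre : p.1 <+: cs := List.isPrefixOf_iff_prefix.mp hp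
    have hlen : p.1.length ≤ cs.length := hpre.length_le
    have hpos : 0 < p.1.length := by
      fin_cases hm <;> decide
    simp only [List.length_drop]
    omega
  · simp

def format_metric_name_alt (key : String) : String :=
  String.ofList (pvAltPass (pvAltTitle key.toList))

-- ===== PRECONDITION & SPEC =====
def Spec_format_metric_name (key : String) (out : String) : Prop := out = format_metric_name_alt key
instance (key : String) (out : String) : Decidable (Spec_format_metric_name key out) := by unfold Spec_format_metric_name; infer_instance

-- ===== CLAIM (what is proved, stated in full; the proofs are below) =====
def Claim_equal_format_metric_name : Prop := ∀ (key : String), Dom_format_metric_name key → Spec_format_metric_name key (format_metric_name key)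

-- ===== LEMMAS AND PROOFS =====

-- simple structural spec of Python str.replace (old ≠ [])
def pvReplS (old new : List Char) : List Char → List Char
  | [] => []
  | c :: t =>
      if old.isPrefixOf (c :: t) then new ++ pvReplS old new (t.drop (old.length - 1))
      else c :: pvReplS old new t
termination_by cs => cs.length
decreasing_by
  · simp only [List.length_cons]
    have : (t.drop (old.length - 1)).length = t.length - (old.length - 1) := List.length_drop
    omega
  · simp

lemma pvReplS_nil (old new : List Char) : pvReplS old new [] = [] := by
  rw [pvReplS]

lemma pvReplS_no_match (old new : List Char) (c : Char) (t : List Char)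
    (h : ¬ old.isPrefixOf (c :: t) = true) :
    pvReplS old new (c :: t) = c :: pvReplS old new t := by
  rw [pvReplS, if_neg h]

lemma pvReplace_go_eq (old new : List Char) (hold : old ≠ []) :
    ∀ (fuel : Nat) (l acc : List Char), l.length ≤ fuel →
      PySem.Chars.replace.go old new fuel l acc = acc.reverse ++ pvReplS old new l := by
  intro fuel
  induction fuel with
  | zero =>
      intro l acc hl
      have hnil : l = [] := List.eq_nil_of_length_eq_zero (Nat.le_zero.mp hl)
      subst hnil
      simp [PySem.Chars.replace.go, pvReplS_nil]
  | succ n ih =>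
      intro l acc hl
      cases l with
      | nil => simp [PySem.Chars.replace.go, pvReplS_nil]
      | cons c t =>
          by_cases hm : old.isPrefixOf (c :: t) = true
          · have hstep : PySem.Chars.replace.go old new (n+1) (c::t) acc
                = PySem.Chars.replace.go old new n (List.drop old.length (c::t)) (new.reverse ++ acc) := by
              simp [PySem.Chars.replace.go, hm]
            have holdpos : 0 < old.length := List.length_pos_of_ne_nil hold
            have hdrop : List.drop old.length (c::t) = t.drop (old.length - 1) := by
              cases old with
              | nil => exact absurd rfl hold
              | cons o os => simp
            have hlen : (t.drop (old.length - 1)).length ≤ n := by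
              have : (t.drop (old.length - 1)).length = t.length - (old.length - 1) := List.length_drop
              simp only [List.length_cons] at hl
              omega
            rw [hstep, hdrop, ih _ _ hlen, pvReplS, if_pos hm]
            simp
          · have hstep : PySem.Chars.replace.go old new (n+1) (c::t) acc
                = PySem.Chars.replace.go old new n t (c :: acc) := by
              simp [PySem.Chars.replace.go, hm]
            have hlen : t.length ≤ n := by simp only [List.length_cons] at hl; omega
            rw [hstep, ih _ _ hlen, pvReplS_no_match _ _ _ _ hm]
            simp

lemma pvReplace_eq_pvReplS (old new : List Char) (hold : old ≠ []) (s : List Char) :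
    PySem.Chars.replace s old new = pvReplS old new s := by
  have he : old.isEmpty = false := by simp [hold]
  rw [PySem.Chars.replace, he]
  simpa using pvReplace_go_eq old new hold s.length s [] (le_refl _)

-- the single-character substitution performed by A's first replace pass
def pvSub (c : Char) : Char := if c = '_' then ' ' else c

lemma pvReplS_underscore (cs : List Char) :
    pvReplS ['_'] [' '] cs = cs.map pvSub := by
  induction cs with
  | nil => rw [pvReplS_nil]; rfl
  | cons c t ih =>
      by_cases hc : c = '_'
      · subst hc
        have hm : ['_'].isPrefixOf ('_' :: t) = true := by simp [List.isPrefixOf]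
        rw [pvReplS, if_pos hm]
        simp [pvSub, ih]
      · have hm : ¬ ['_'].isPrefixOf (c :: t) = true := by
          simp [List.isPrefixOf]
          exact fun h => hc h.symm
        rw [pvReplS_no_match _ _ _ _ hm, ih]
        simp [pvSub, hc]

lemma pvSub_isAlpha (c : Char) : (pvSub c).isAlpha = c.isAlpha := by
  by_cases hc : c = '_'
  · subst hc; decide
  · simp [pvSub, hc]

def pvOptAlpha : Option Char → Bool
  | none => false
  | some p => p.isAlpha

-- fused title map = staged replace-then-title
lemma pvAltTitle_go (cs : List Char) :
    ∀ (po : Option Char),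
      (cs.zip (po :: cs.map some)).map (fun cp => pvTitledChar cp.1 cp.2)
        = pvTitle (cs.map pvSub) (pvOptAlpha po) := by
  induction cs with
  | nil => intro po; rfl
  | cons c t ih =>
      intro po
      simp only [List.map_cons, List.zip_cons_cons, pvTitle]
      refine congrArg₂ List.cons ?_ ?_
      · by_cases hc : c = '_'
        · subst hc
          cases po with
          | none => decide
          | some p =>
              have h1 : pvTitledChar '_' (some p) = ' ' := by simp [pvTitledChar]
              have h2 : (pvSub '_').isAlpha = false := by decide
              rw [h1, h2]
              simp [pvSub]
        · simp [pvTitledChar, hc, pvSub, pvOptAlpha]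
          cases po <;> rfl
      · rw [ih (some c)]
        have : pvOptAlpha (some c) = (pvSub c).isAlpha := by
          rw [pvSub_isAlpha]; rfl
        rw [this]

lemma pvAltTitle_eq (cs : List Char) :
    pvAltTitle cs = pvTitle (PySem.Chars.replace cs ['_'] [' ']) false := by
  rw [pvReplace_eq_pvReplS _ _ (by decide) cs, pvReplS_underscore]
  exact pvAltTitle_go cs none

-- a prefix of u ++ t is resolved against u
lemma pvPrefix_append_cases {k u t : List Char} (h : k <+: u ++ t) : k <+: u ∨ u <+: k :=
  List.prefix_or_prefix_of_prefix h (List.prefix_append u t)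

-- k can match nowhere that overlaps s, whatever follows s
def pvNoHitB (s k : List Char) : Bool :=
  (List.range s.length).all (fun p => !(k.isPrefixOf (s.drop p)) && !((s.drop p).isPrefixOf k))

lemma pvNoHitB_iff (s k : List Char) :
    pvNoHitB s k = true ↔ ∀ p < s.length, ¬ k <+: s.drop p ∧ ¬ s.drop p <+: k := by
  simp [pvNoHitB, Bool.eq_false_iff, List.isPrefixOf_iff_prefix]

-- a good dict entry: key nonempty with lowercase tail, value starting with a non-lowercase char
def pvGood (p : List Char × List Char) : Bool :=
  (!p.1.isEmpty) && p.1.tail.all Char.isLower &&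
    (match p.2 with | [] => false | c :: _ => !c.isLower)

def pvSeqR (kv : List (List Char × List Char)) (cs : List Char) : List Char :=
  kv.foldl (fun f p => pvReplS p.1 p.2 f) cs

lemma pvSeqR_cons (q : List Char × List Char) (kv : List (List Char × List Char)) (cs : List Char) :
    pvSeqR (q :: kv) cs = pvSeqR kv (pvReplS q.1 q.2 cs) := rfl

lemma pvSeq_eq_pvSeqR (kv : List (List Char × List Char))
    (h : ∀ p ∈ kv, p.1 ≠ []) (cs : List Char) :
    kv.foldl (fun f p => PySem.Chars.replace f p.1 p.2) cs = pvSeqR kv cs := by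
  induction kv generalizing cs with
  | nil => rfl
  | cons q kv ih =>
      simp only [List.foldl_cons, pvSeqR_cons]
      rw [pvReplace_eq_pvReplS q.1 q.2 (h q List.mem_cons_self) cs]
      exact ih (fun p hp => h p (List.mem_cons_of_mem _ hp)) _

lemma pvReplS_match (old new rest : List Char) (hold : old ≠ []) :
    pvReplS old new (old ++ rest) = new ++ pvReplS old new rest := by
  cases old with
  | nil => exact absurd rfl hold
  | cons o os =>
      have hm : (o :: os).isPrefixOf (o :: (os ++ rest)) = true :=
        List.isPrefixOf_iff_prefix.mpr (by
          rw [show o :: (os ++ rest) = (o :: os) ++ rest from rfl]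
          exact List.prefix_append _ _)
      rw [show (o :: os) ++ rest = o :: (os ++ rest) from rfl, pvReplS, if_pos hm]
      have : List.drop ((o :: os).length - 1) (os ++ rest) = rest := by
        simp only [List.length_cons, Nat.add_sub_cancel]
        exact List.drop_left
      rw [this]

-- region lemma: a replace pass copies a hit-free block unchanged
lemma pvReplS_region (old new s : List Char) (h : pvNoHitB s old = true) :
    ∀ t, pvReplS old new (s ++ t) = s ++ pvReplS old new t := by
  rw [pvNoHitB_iff] at h
  induction s with
  | nil => intro t; rfl
  | cons c s' ih =>
      intro t
      have h0 := h 0 (by simp)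
      simp only [List.drop_zero] at h0
      have hnm : ¬ old.isPrefixOf (c :: (s' ++ t)) = true := by
        rw [List.isPrefixOf_iff_prefix]
        intro hpre
        rcases pvPrefix_append_cases (t := t) (u := c :: s') hpre with h1 | h1
        · exact h0.1 h1
        · exact h0.2 h1
      rw [show (c :: s') ++ t = c :: (s' ++ t) from rfl, pvReplS_no_match _ _ _ _ hnm]
      have ih' : ∀ p < s'.length, ¬ old <+: s'.drop p ∧ ¬ s'.drop p <+: old := by
        intro p hp
        have := h (p+1) (by simp; omega)
        simpa using this
      rw [ih ih' t]
      rfl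

lemma pvSeqR_region (kv : List (List Char × List Char)) (s : List Char)
    (h : ∀ p ∈ kv, pvNoHitB s p.1 = true) :
    ∀ t, pvSeqR kv (s ++ t) = s ++ pvSeqR kv t := by
  induction kv with
  | nil => intro t; rfl
  | cons q kv ih =>
      intro t
      rw [pvSeqR_cons, pvSeqR_cons, pvReplS_region q.1 q.2 s (h q List.mem_cons_self) t]
      exact ih (fun p hp => h p (List.mem_cons_of_mem _ hp)) _

-- a lowercase prefix of a replace pass's output is copied from the input
lemma pvReplS_lower_take (old : List Char) (d : Char) (ds : List Char) (hd : d.isLower = false) :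
    ∀ (s : List Char) (n : Nat),
      (List.take n (pvReplS old (d :: ds) s)).all Char.isLower = true →
      List.take n (pvReplS old (d :: ds) s) = List.take n s := by
  intro s
  induction s with
  | nil => intro n _; rw [pvReplS_nil]
  | cons c t ih =>
      intro n hlow
      by_cases hm : old.isPrefixOf (c :: t) = true
      · rw [pvReplS, if_pos hm] at hlow ⊢
        cases n with
        | zero => simp
        | succ m =>
            exfalso
            simp only [List.cons_append, List.take_succ_cons, List.all_cons] at hlow
            simp [hd] at hlow
      · rw [pvReplS_no_match _ _ _ _ hm] at hlow ⊢
        cases n with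
        | zero => simp
        | succ m =>
            simp only [List.take_succ_cons, List.all_cons, Bool.and_eq_true] at hlow ⊢
            rw [ih m hlow.2]

lemma pvTransfer (old : List Char) (d : Char) (ds : List Char) (hd : d.isLower = false)
    (k : List Char) (hk : k ≠ []) (hkl : k.tail.all Char.isLower = true) (c : Char) (cs : List Char)
    (h : ¬ k <+: (c :: cs)) : ¬ k <+: (c :: pvReplS old (d :: ds) cs) := by
  intro hc
  cases k with
  | nil => exact hk rfl
  | cons e tl =>
      rw [List.cons_prefix_cons] at hc
      obtain ⟨hec, htl⟩ := hc
      have htake : tl = List.take tl.length (pvReplS old (d :: ds) cs) :=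
        List.prefix_iff_eq_take.mp htl
      have hlow : (List.take tl.length (pvReplS old (d :: ds) cs)).all Char.isLower = true := by
        rw [← htake]; simpa using hkl
      have heq := pvReplS_lower_take old d ds hd cs tl.length hlow
      apply h
      rw [List.cons_prefix_cons]
      refine ⟨hec, ?_⟩
      have htl' : tl = List.take tl.length cs := htake.trans heq
      refine ⟨cs.drop tl.length, ?_⟩
      nth_rewrite 1 [htl']
      rw [List.take_append_drop]

lemma pvSeqR_head (kv : List (List Char × List Char)) (hg : kv.all pvGood = true)
    (c : Char) (cs : List Char) (h : ∀ p ∈ kv, ¬ p.1 <+: (c :: cs)) :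
    pvSeqR kv (c :: cs) = c :: pvSeqR kv cs := by
  induction kv generalizing cs with
  | nil => rfl
  | cons q kv ih =>
      simp only [List.all_cons, Bool.and_eq_true] at hg
      obtain ⟨hgq, hgkv⟩ := hg
      have hq1 : ¬ q.1.isPrefixOf (c :: cs) = true := by
        rw [List.isPrefixOf_iff_prefix]; exact h q List.mem_cons_self
      obtain ⟨d, ds, hq2⟩ : ∃ d ds, q.2 = d :: ds := by
        cases hq2 : q.2 with
        | nil => rw [pvGood, hq2] at hgq; simp at hgq
        | cons d ds => exact ⟨d, ds, rfl⟩
      have hd : d.isLower = false := by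
        rw [pvGood, hq2] at hgq
        simp only [Bool.and_eq_true, Bool.not_eq_true'] at hgq
        exact hgq.2
      rw [pvSeqR_cons, pvSeqR_cons, pvReplS_no_match _ _ _ _ hq1]
      rw [hq2]
      apply ih hgkv
      intro p hp
      have hpg : pvGood p = true := by
        have := List.all_eq_true.mp hgkv
        exact this p hp
      have hpk : p.1 ≠ [] := by
        intro he
        rw [pvGood, he] at hpg
        simp at hpg
      have hpl : p.1.tail.all Char.isLower = true := by
        rw [pvGood] at hpg
        simp only [Bool.and_eq_true] at hpg
        exact hpg.1.2
      exact pvTransfer q.1 d ds hd p.1 hpk hpl c cs (h p (List.mem_cons_of_mem _ hp))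

lemma pvAltFirst_none (kv : List (List Char × List Char)) (cs : List Char)
    (h : pvAltFirst kv cs = none) : ∀ p ∈ kv, ¬ p.1 <+: cs := by
  induction kv with
  | nil => intro p hp; simp at hp
  | cons q kv ih =>
      intro p hp
      simp only [pvAltFirst] at h
      by_cases hq : q.1.isPrefixOf cs = true
      · simp [hq] at h
      · simp only [hq, Bool.false_eq_true, if_false] at h
        rcases List.mem_cons.mp hp with rfl | hp'
        · rw [← List.isPrefixOf_iff_prefix]; exact hq
        · exact ih h p hp'

lemma pvAltPass_some (cs : List Char) (p : List Char × List Char)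
    (h : pvAltFirst pvAltRepl cs = some p) :
    pvAltPass cs = p.2 ++ pvAltPass (cs.drop p.1.length) := by
  rw [pvAltPass]
  split
  · next q heq => rw [heq] at h; injection h with h; subst h; rfl
  · next heq => rw [heq] at h; exact absurd h (by simp)

lemma pvAltPass_none_nil (h : pvAltFirst pvAltRepl [] = none) : pvAltPass [] = [] := by
  rw [pvAltPass]
  split
  · next q heq => rw [heq] at h; exact absurd h (by simp)
  · rfl

lemma pvAltPass_none_cons (c : Char) (t : List Char)
    (h : pvAltFirst pvAltRepl (c :: t) = none) : pvAltPass (c :: t) = c :: pvAltPass t := by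
  rw [pvAltPass]
  split
  · next q heq => rw [heq] at h; exact absurd h (by simp)
  · rfl

lemma pvSeqR_nil_input (kv : List (List Char × List Char)) : pvSeqR kv [] = [] := by
  induction kv with
  | nil => rfl
  | cons q kv ih => rw [pvSeqR_cons, pvReplS_nil]; exact ih

lemma pvKV_eq_pvAltRepl : pvKV = pvAltRepl := by decide

lemma pvMain : ∀ (cs : List Char), pvSeqR pvAltRepl cs = pvAltPass cs := by
  have hgood : pvAltRepl.all pvGood = true := by decide
  have hnd : pvAltRepl.Nodup := by decide
  have hpairs : ∀ q ∈ pvAltRepl, ∀ q' ∈ pvAltRepl, q ≠ q' →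
      pvNoHitB q.1 q'.1 = true ∧ pvNoHitB q.2 q'.1 = true := by decide
  have H : ∀ n (cs : List Char), cs.length ≤ n → pvSeqR pvAltRepl cs = pvAltPass cs := by
    intro n
    induction n with
    | zero =>
        intro cs hl
        have : cs = [] := List.eq_nil_of_length_eq_zero (Nat.le_zero.mp hl)
        subst this
        rw [pvSeqR_nil_input, pvAltPass_none_nil (by rfl)]
    | succ n ih =>
        intro cs hl
        cases hf : pvAltFirst pvAltRepl cs with
        | some p =>
            obtain ⟨hm, hp⟩ := pvAltFirst_some_mem_prefix _ _ _ hf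
            have hpg : pvGood p = true := List.all_eq_true.mp hgood p hm
            have hpk : p.1 ≠ [] := by
              intro he
              rw [pvGood, he] at hpg
              simp at hpg
            obtain ⟨rest, hrest⟩ := List.isPrefixOf_iff_prefix.mp hp
            obtain ⟨pre, post, hsplit⟩ := List.append_of_mem hm
            have hndsplit := List.nodup_append.mp (hsplit ▸ hnd)
            have hppre : p ∉ pre := fun hin =>
              hndsplit.2.2 p hin p List.mem_cons_self rfl
            have hpre_nohit : ∀ q ∈ pre, pvNoHitB p.1 q.1 = true := by
              intro q hq
              have hqm : q ∈ pvAltRepl := by rw [hsplit]; exact List.mem_append_left _ hq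
              have hne : p ≠ q := fun he => hppre (he ▸ hq)
              exact (hpairs p hm q hqm hne).1
            have hppost : p ∉ post := (List.nodup_cons.mp hndsplit.2.1).1
            have hpost_nohit : ∀ q ∈ post, pvNoHitB p.2 q.1 = true := by
              intro q hq
              have hqm : q ∈ pvAltRepl := by
                rw [hsplit]
                exact List.mem_append_right _ (List.mem_cons_of_mem _ hq)
              have hne : p ≠ q := fun he => hppost (he ▸ hq)
              exact (hpairs p hm q hqm hne).2
            have hchain : ∀ t, pvSeqR pvAltRepl (p.1 ++ t) = p.2 ++ pvSeqR pvAltRepl t := by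
              intro t
              rw [hsplit]
              have e1 : ∀ u, pvSeqR (pre ++ p :: post) u = pvSeqR post (pvReplS p.1 p.2 (pvSeqR pre u)) := by
                intro u
                simp [pvSeqR, List.foldl_append]
              rw [e1, e1, pvSeqR_region pre p.1 hpre_nohit t,
                  pvReplS_match p.1 p.2 _ hpk, pvSeqR_region post p.2 hpost_nohit]
            have hrlen : rest.length ≤ n := by
              have h1 : cs.length = p.1.length + rest.length := by
                rw [← hrest]; simp
              have h2 : 0 < p.1.length := List.length_pos_of_ne_nil hpk
              omega
            have hdrop : cs.drop p.1.length = rest := by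
              rw [← hrest]; exact List.drop_left
            rw [pvAltPass_some cs p hf, hdrop, ← ih rest hrlen, ← hrest]
            exact hchain rest
        | none =>
            cases cs with
            | nil => rw [pvSeqR_nil_input, pvAltPass_none_nil hf]
            | cons c t =>
                have hnom := pvAltFirst_none pvAltRepl (c :: t) hf
                rw [pvSeqR_head pvAltRepl hgood c t hnom, pvAltPass_none_cons c t hf,
                    ih t (by simp at hl; omega)]
  intro cs
  exact H cs.length cs (le_refl _)

-- ===== VERDICT (by name: the statement is the Claim_ definition above) =====
theorem format_metric_name_spec : Claim_equal_format_metric_name := by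
  intro key _
  have hkeys : ∀ p ∈ pvKV, p.1 ≠ [] := by decide
  show String.ofList (pvKV.foldl (fun f p => PySem.Chars.replace f p.1 p.2)
        (pvTitle (PySem.Chars.replace key.toList ['_'] [' ']) false))
      = String.ofList (pvAltPass (pvAltTitle key.toList))
  rw [pvSeq_eq_pvSeqR pvKV hkeys, pvKV_eq_pvAltRepl, pvMain, pvAltTitle_eq]
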